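-- pv_equiv track=rewrite | github.com/se-buw/alloy-metrics | analysis/edit_paths.py | calculate_parseerror_fix_steps
-- ===== SOURCE A (Python) =====
-- def calculate_parseerror_fix_steps(status_chain):
--     steps = []
--     i = 0
--     while i < len(status_chain):
--         if status_chain[i] == "PARSEERROR":
--             # Record the first occurrence of consecutive PARSEERRORs
--             start = i
--             while i + 1 < len(status_chain) and status_chain[i + 1] == "PARSEERROR":
--                 i += 1
--             # Find the next non-PARSEERROR value
--             for j in range(i + 1, len(status_chain)):
--                 if status_chain[j] != "PARSEERROR":
--                     steps.append(j - start)
--                     break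
--         i += 1
--     return steps
-- ===== SOURCE B (Python) =====
-- def calculate_parseerror_fix_steps(status_chain):
--     # One linear pass with a run counter: count consecutive PARSEERRORs,
--     # emit the run length when a non-error status ends the run
--     # (a trailing error run is never emitted).
--     steps = []
--     run = 0
--     for s in status_chain:
--         if s == "PARSEERROR":
--             run += 1
--         else:
--             if run != 0:
--                 steps.append(run)
--             run = 0
--     return steps
-- ===== Notes on version B (the rewrite author's own statement) =====
-- stated objective: simpler
-- what changed: Replaced the nested index-based while/for scanning (inner run scan plus a forward search for the next non-error) with a single element-wise pass that keeps a run counter and emits it when a non-error status ends the run.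
import Mathlib
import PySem

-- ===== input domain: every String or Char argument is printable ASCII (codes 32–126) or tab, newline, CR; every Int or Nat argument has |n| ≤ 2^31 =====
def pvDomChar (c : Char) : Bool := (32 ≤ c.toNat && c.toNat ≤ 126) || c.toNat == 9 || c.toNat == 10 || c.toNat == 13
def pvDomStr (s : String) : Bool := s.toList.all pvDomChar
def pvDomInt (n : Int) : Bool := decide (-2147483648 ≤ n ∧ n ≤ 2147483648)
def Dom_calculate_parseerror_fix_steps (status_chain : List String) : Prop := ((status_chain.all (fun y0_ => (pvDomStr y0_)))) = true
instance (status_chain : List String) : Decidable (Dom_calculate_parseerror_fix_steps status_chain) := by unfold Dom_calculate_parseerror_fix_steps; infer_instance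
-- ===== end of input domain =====

-- B replaces A's nested index scans with one element-wise pass keeping a run counter (simpler).

-- ===== PORT A =====
-- inner 'while i + 1 < len(...) and status_chain[i+1] == "PARSEERROR": i += 1'
def pvAdvance (status_chain : List String) (i : Nat) : Nat :=
  if h : i + 1 < status_chain.length then
    if status_chain[i + 1] = "PARSEERROR" then pvAdvance status_chain (i + 1) else i
  else i
termination_by status_chain.length - i

-- 'for j in range(i+1, len(...)): if status_chain[j] != "PARSEERROR": ... break'
def pvFindJ (status_chain : List String) (j : Nat) : Option Nat :=
  if h : j < status_chain.length then
    if status_chain[j] ≠ "PARSEERROR" then some j else pvFindJ status_chain (j + 1)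
  else none
termination_by status_chain.length - j

lemma pvAdvance_ge (status_chain : List String) (i : Nat) : i ≤ pvAdvance status_chain i := by
  fun_induction pvAdvance with
  | case1 i h h2 ih => omega
  | case2 => omega
  | case3 => omega

-- the outer 'while i < len(status_chain)'
def pvLoopA (status_chain : List String) (i : Nat) (steps : List Int) : List Int :=
  if h : i < status_chain.length then
    if status_chain[i] = "PARSEERROR" then
      let start := i
      let i' := pvAdvance status_chain i
      let steps' :=
        match pvFindJ status_chain (i' + 1) with
        | some j => steps ++ [(j : Int) - (start : Int)]
        | none => steps
      pvLoopA status_chain (i' + 1) steps'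
    else
      pvLoopA status_chain (i + 1) steps
  else steps
termination_by status_chain.length - i
decreasing_by
  · have := pvAdvance_ge status_chain i; omega
  · omega

def calculate_parseerror_fix_steps (status_chain : List String) : List Int :=
  pvLoopA status_chain 0 []

-- ===== PORT B =====
def pvStep (st : List Int × Int) (s : String) : List Int × Int :=
  if s = "PARSEERROR" then (st.1, st.2 + 1)
  else if st.2 ≠ 0 then (st.1 ++ [st.2], 0) else (st.1, 0)

def calculate_parseerror_fix_steps_alt (status_chain : List String) : List Int :=
  (status_chain.foldl pvStep ([], 0)).1

-- ===== PRECONDITION & SPEC =====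
def Spec_calculate_parseerror_fix_steps (status_chain : List String) (out : List Int) : Prop := out = calculate_parseerror_fix_steps_alt status_chain
instance (status_chain : List String) (out : List Int) : Decidable (Spec_calculate_parseerror_fix_steps status_chain out) := by unfold Spec_calculate_parseerror_fix_steps; infer_instance

-- ===== CLAIM (what is proved, stated in full; the proofs are below) =====
def Claim_equal_calculate_parseerror_fix_steps : Prop := ∀ (status_chain : List String), Dom_calculate_parseerror_fix_steps status_chain → Spec_calculate_parseerror_fix_steps status_chain (calculate_parseerror_fix_steps status_chain)

-- ===== LEMMAS AND PROOFS =====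

-- abstract single-pass step function ('h'): run counter over the remaining list
def pvH (m : Int) : List String → List Int
  | [] => []
  | x :: t => if x = "PARSEERROR" then pvH (m + 1) t else if m ≠ 0 then m :: pvH 0 t else pvH 0 t

-- number of leading "PARSEERROR"s
def pvLead : List String → Nat
  | [] => 0
  | x :: t => if x = "PARSEERROR" then 1 + pvLead t else 0

lemma pvH_spec (m : Int) (steps : List Int) (l : List String) :
    (l.foldl pvStep (steps, m)).1 = steps ++ pvH m l := by
  induction l generalizing m steps with
  | nil => simp [pvH]
  | cons x t ih =>
    rw [List.foldl_cons]
    by_cases hx : x = "PARSEERROR"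
    · rw [show pvStep (steps, m) x = (steps, m + 1) from by simp [pvStep, hx], ih]
      simp [pvH, hx]
    · by_cases hm : m = 0
      · rw [show pvStep (steps, m) x = (steps, 0) from by simp [pvStep, hx, hm], ih]
        simp [pvH, hx, hm]
      · rw [show pvStep (steps, m) x = (steps ++ [m], 0) from by simp [pvStep, hx, hm], ih]
        simp [pvH, hx, hm]

lemma pvLead_drop (l : List String) :
    l.drop (pvLead l) = [] ∨ ∃ y t, l.drop (pvLead l) = y :: t ∧ y ≠ "PARSEERROR" := by
  induction l with
  | nil => left; simp
  | cons x t ih =>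
    by_cases hx : x = "PARSEERROR"
    · have hk : pvLead (x :: t) = pvLead t + 1 := by simp [pvLead, hx, Nat.add_comm]
      have hdrop : (x :: t).drop (pvLead (x :: t)) = t.drop (pvLead t) := by rw [hk]; simp
      rw [hdrop]; exact ih
    · right; exact ⟨x, t, by simp [pvLead, hx], hx⟩

lemma pvH_lead (l : List String) (m : Int) (hm : 0 < m) :
    pvH m l = if l.drop (pvLead l) = [] then []
              else (m + (pvLead l : Int)) :: pvH 0 (l.drop (pvLead l)).tail := by
  induction l generalizing m with
  | nil => simp [pvH, pvLead]
  | cons x t ih =>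
    by_cases hx : x = "PARSEERROR"
    · have hk : pvLead (x :: t) = pvLead t + 1 := by simp [pvLead, hx, Nat.add_comm]
      have hdrop : (x :: t).drop (pvLead (x :: t)) = t.drop (pvLead t) := by rw [hk]; simp
      have h1 : pvH m (x :: t) = pvH (m + 1) t := by simp [pvH, hx]
      rw [h1, ih (m + 1) (by omega), hdrop, hk]
      by_cases he : t.drop (pvLead t) = [] <;> simp [he]
      ring
    · simp [pvH, pvLead, hx, show m ≠ 0 from by omega]

lemma pvAdvance_eq (status_chain : List String) (i : Nat) :
    pvAdvance status_chain i = i + pvLead (status_chain.drop (i + 1)) := by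
  fun_induction pvAdvance with
  | case1 i h h2 ih =>
    have hd : status_chain.drop (i + 1)
        = status_chain[i + 1] :: status_chain.drop (i + 1 + 1) := List.drop_eq_getElem_cons h
    have hk : pvLead (status_chain[i + 1] :: status_chain.drop (i + 1 + 1))
        = 1 + pvLead (status_chain.drop (i + 1 + 1)) := by simp [pvLead, h2]
    rw [ih, hd, hk]; omega
  | case2 i h h2 =>
    have hd : status_chain.drop (i + 1)
        = status_chain[i + 1] :: status_chain.drop (i + 1 + 1) := List.drop_eq_getElem_cons h
    rw [hd]; simp [pvLead, h2]
  | case3 i h =>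
    have : status_chain.drop (i + 1) = [] := List.drop_eq_nil_of_le (by omega)
    simp [this, pvLead]

lemma pvLoopA_eq (status_chain : List String) (i : Nat) (steps : List Int) :
    pvLoopA status_chain i steps = steps ++ pvH 0 (status_chain.drop i) := by
  fun_induction pvLoopA with
  | case3 i steps h =>
    have hnil : status_chain.drop i = [] := List.drop_eq_nil_of_le (by omega)
    simp [hnil, pvH]
  | case2 i steps h hpe ih =>
    have hd : status_chain.drop i = status_chain[i] :: status_chain.drop (i + 1) :=
      List.drop_eq_getElem_cons h
    rw [ih, hd]
    simp [pvH, hpe]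
  | case1 i steps h hpe start i' steps' ih =>
    have hi' : i' = pvAdvance status_chain i := rfl
    have hsteps' : steps' = (match pvFindJ status_chain (i' + 1) with
        | some j => steps ++ [(j : Int) - (i : Int)] | none => steps) := rfl
    have hadv : i' = i + pvLead (status_chain.drop (i + 1)) := pvAdvance_eq status_chain i
    have hd : status_chain.drop i = status_chain[i] :: status_chain.drop (i + 1) :=
      List.drop_eq_getElem_cons h
    have hdrop2 : status_chain.drop (i' + 1)
        = (status_chain.drop (i + 1)).drop (pvLead (status_chain.drop (i + 1))) := by
      rw [List.drop_drop, hadv]; congr 1; omega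
    have hH : pvH 0 (status_chain.drop i)
        = if (status_chain.drop (i + 1)).drop (pvLead (status_chain.drop (i + 1))) = [] then []
          else ((1 : Int) + (pvLead (status_chain.drop (i + 1)) : Int))
            :: pvH 0 (((status_chain.drop (i + 1)).drop (pvLead (status_chain.drop (i + 1)))).tail) := by
      rw [hd]
      have h1 : pvH 0 (status_chain[i] :: status_chain.drop (i + 1))
          = pvH 1 (status_chain.drop (i + 1)) := by simp [pvH, hpe]
      rw [h1, pvH_lead _ 1 (by omega)]
    rcases pvLead_drop (status_chain.drop (i + 1)) with hnil | ⟨y, t, hyt, hy⟩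
    · -- the PARSEERROR run reaches the end of the list: nothing is appended
      have hlen : status_chain.length ≤ i' + 1 := by
        have := hdrop2; rw [hnil] at this
        have := List.drop_eq_nil_iff.mp this; omega
      have hfind : pvFindJ status_chain (i' + 1) = none := by
        rw [pvFindJ]; simp [show ¬ (i' + 1 < status_chain.length) from by omega]
      simp only [hfind] at hsteps'
      have hend : status_chain.drop (i' + 1) = [] := by rw [hdrop2, hnil]
      rw [ih, hsteps', hend, hH, if_pos hnil]
      simp [pvH]
    · -- a non-PARSEERROR follows the run: the for-loop appends j - start
      have hne : (status_chain.drop (i + 1)).drop (pvLead (status_chain.drop (i + 1))) ≠ [] := by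
        rw [hyt]; simp
      have hlt : i' + 1 < status_chain.length := by
        by_contra hc
        exact hne (by rw [← hdrop2]; exact List.drop_eq_nil_of_le (by omega))
      have hget : status_chain[i' + 1]'hlt = y := by
        have h0 : (status_chain.drop (i' + 1))[0]'(by rw [hdrop2, hyt]; simp) = y := by
          simp [hdrop2, hyt]
        rw [List.getElem_drop] at h0
        simpa using h0
      have hfind : pvFindJ status_chain (i' + 1) = some (i' + 1) := by
        rw [pvFindJ]
        simp only [hlt, dif_pos]
        rw [if_pos (by rw [hget]; exact hy)]
      simp only [hfind] at hsteps'
      have hnext : status_chain.drop (i' + 1) = y :: t := by rw [hdrop2, hyt]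
      rw [ih, hsteps', hnext, hH, if_neg hne, hyt]
      have h2 : pvH 0 (y :: t) = pvH 0 t := by simp [pvH, hy]
      rw [h2]
      simp only [List.append_assoc, List.cons_append, List.nil_append]
      congr 2
      rw [hadv]; push_cast; ring

-- ===== VERDICT (by name: the statement is the Claim_ definition above) =====
theorem calculate_parseerror_fix_steps_spec : Claim_equal_calculate_parseerror_fix_steps := by
  intro status_chain _
  unfold Spec_calculate_parseerror_fix_steps calculate_parseerror_fix_steps calculate_parseerror_fix_steps_alt
  rw [pvLoopA_eq, pvH_spec]
  simp
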